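-- pv_equiv track=rewrite | github.com/gkmishragaurav/python_practice | Problem solving/longest_string_no_reap.py | check_repeat
-- ===== SOURCE A (Python) =====
-- def check_repeat(s, start, end):
--     temp={}
--     for i in range(start, end):
--         if s[i] in temp.keys():
--             return True
--         else:
--             temp[s[i]] = 1
--
--     return False
-- ===== SOURCE B (Python) =====
-- def check_repeat(s, start, end):
--     chars = [s[i] for i in range(start, end)]
--     return len(set(chars)) != len(chars)
-- ===== Notes on version B (the rewrite author's own statement) =====
-- stated objective: idiomatic
-- what changed: B builds the whole character list over range(start, end) in one comprehension and compares the distinct count with the total count (len(set(chars)) != len(chars)), instead of A's incremental dict-membership loop with an early return.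
-- outside the precondition, e.g. on check_repeat('aab', 0, 10): A returns True, B raises IndexError
import Mathlib
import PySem

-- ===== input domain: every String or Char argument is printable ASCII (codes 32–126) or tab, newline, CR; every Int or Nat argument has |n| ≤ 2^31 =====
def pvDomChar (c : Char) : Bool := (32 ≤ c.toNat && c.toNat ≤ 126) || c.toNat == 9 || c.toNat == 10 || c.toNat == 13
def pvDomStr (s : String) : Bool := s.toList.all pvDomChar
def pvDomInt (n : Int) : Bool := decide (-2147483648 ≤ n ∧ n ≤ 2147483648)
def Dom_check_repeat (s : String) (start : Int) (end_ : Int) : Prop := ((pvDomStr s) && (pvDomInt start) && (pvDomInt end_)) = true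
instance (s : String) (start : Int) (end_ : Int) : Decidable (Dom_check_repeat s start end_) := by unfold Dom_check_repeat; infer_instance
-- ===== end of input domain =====

-- B replaces A's incremental dict-membership loop (early return) by building the whole
-- character list for range(start, end) and comparing distinct count with total count (idiomatic).

-- ===== PORT A =====
-- the for-loop of A: iterate over the index list, keeping the dict 'temp'; s[i] out of
-- range (pyGet? = none) is Python's IndexError, excluded by Pre_ below
def check_repeat_loop (cs : List Char) (idxs : List Int) (temp : PySem.Dict Char Int) : Bool :=
  match idxs with
  | [] => false
  | i :: rest =>
    match PySem.List.pyGet? cs i with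
    | none => false
    | some c =>
      if temp.contains c then true
      else check_repeat_loop cs rest (temp.insert c 1)

def check_repeat (s : String) (start : Int) (end_ : Int) : Bool :=
  check_repeat_loop s.toList (PySem.List.pyRange start end_ 1) PySem.Dict.empty

-- ===== PORT B =====
-- chars = [s[i] for i in range(start, end)]  (mapM: none = IndexError, excluded by Pre_);
-- then len(set(chars)) != len(chars)
def check_repeat_alt (s : String) (start : Int) (end_ : Int) : Bool :=
  match (PySem.List.pyRange start end_ 1).mapM (fun i => PySem.List.pyGet? s.toList i) with
  | none => false
  | some chars => decide ((PySem.Set.ofList chars).length ≠ chars.length)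

-- ===== PRECONDITION & SPEC =====
-- Pre_ requires every index of range(start, end) to be a valid (possibly negative) index of s.
-- Outside it A raises IndexError — except when a duplicate occurs before the first bad index,
-- where A returns True early while B, which builds the whole list first, raises IndexError.
def Pre_check_repeat (s : String) (start : Int) (end_ : Int) : Prop :=
  start < end_ → (-(s.toList.length : Int) ≤ start ∧ end_ ≤ (s.toList.length : Int))
instance (s : String) (start : Int) (end_ : Int) : Decidable (Pre_check_repeat s start end_) := by
  unfold Pre_check_repeat; infer_instance

def pvWitness_check_repeat : String × Int × Int := ("aba", 0, 3)

def Spec_check_repeat (s : String) (start : Int) (end_ : Int) (out : Bool) : Prop := out = check_repeat_alt s start end_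
instance (s : String) (start : Int) (end_ : Int) (out : Bool) : Decidable (Spec_check_repeat s start end_ out) := by unfold Spec_check_repeat; infer_instance

-- ===== CLAIM (what is proved, stated in full; the proofs are below) =====
def Claim_equal_check_repeat : Prop := ∀ (s : String) (start : Int) (end_ : Int), Dom_check_repeat s start end_ → Pre_check_repeat s start end_ → Spec_check_repeat s start end_ (check_repeat s start end_)

-- ===== LEMMAS AND PROOFS =====

-- A's loop, on an index list whose items are all valid indices, succeeds in building the
-- character list and returns true exactly when that list has a duplicate or hits 'temp'.
lemma check_repeat_loop_char (cs : List Char) (idxs : List Int)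
    (h : ∀ i ∈ idxs, (PySem.List.pyGet? cs i).isSome) :
    ∃ chars, idxs.mapM (fun i => PySem.List.pyGet? cs i) = some chars ∧
      ∀ temp : PySem.Dict Char Int,
        (check_repeat_loop cs idxs temp = true ↔
          ¬ chars.Nodup ∨ ∃ c ∈ chars, temp.contains c = true) := by
  induction idxs with
  | nil =>
      exact ⟨[], by simp, by intro temp; simp [check_repeat_loop]⟩
  | cons i rest ih =>
      have hi : (PySem.List.pyGet? cs i).isSome := h i (by simp)
      obtain ⟨c, hc⟩ := Option.isSome_iff_exists.mp hi
      obtain ⟨chars, hmap, hloop⟩ := ih (fun j hj => h j (by simp [hj]))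
      refine ⟨c :: chars, by simp [List.mapM_cons, hc, hmap], ?_⟩
      intro temp
      by_cases hct : temp.contains c = true
      · simp [check_repeat_loop, hc, hct]
      · simp only [check_repeat_loop, hc]
        rw [if_neg hct]
        rw [hloop (temp.insert c 1)]
        constructor
        · rintro (hnd | ⟨x, hx, hcx⟩)
          · exact Or.inl (fun hn => hnd (List.nodup_cons.mp hn).2)
          · rw [PySem.Dict.contains_insert] at hcx
            rcases Bool.or_eq_true_iff.mp hcx with h1 | h2
            · have hxc : x = c := by simpa using h1
              exact Or.inl (fun hn => ((List.nodup_cons.mp hn).1) (hxc ▸ hx))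
            · exact Or.inr ⟨x, by simp [hx], h2⟩
        · rintro (hnd | ⟨x, hx, hcx⟩)
          · by_cases hmem : c ∈ chars
            · exact Or.inr ⟨c, hmem, by rw [PySem.Dict.contains_insert]; simp⟩
            · exact Or.inl (fun hn => hnd (List.nodup_cons.mpr ⟨hmem, hn⟩))
          · rcases List.mem_cons.mp hx with rfl | hx'
            · exact absurd hcx hct
            · exact Or.inr ⟨x, hx', by rw [PySem.Dict.contains_insert]; simp [hcx]⟩

lemma foldl_add_length_le (chars : List Char) (s : PySem.Set Char) :
    (chars.foldl PySem.Set.add s).length ≤ s.length + chars.length := by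
  induction chars generalizing s with
  | nil => simp
  | cons c rest ih =>
      by_cases hc : c ∈ s
      · rw [List.foldl_cons, PySem.Set.add_of_mem hc]
        have := ih s
        simp only [List.length_cons]
        omega
      · rw [List.foldl_cons, PySem.Set.add_of_not_mem hc]
        have := ih (s ++ [c])
        simp only [List.length_cons, List.length_append, List.length_nil] at this ⊢
        omega

lemma foldl_add_length_eq_iff (chars : List Char) (s : PySem.Set Char) :
    (chars.foldl PySem.Set.add s).length = s.length + chars.length ↔
      chars.Nodup ∧ ∀ c ∈ chars, c ∉ s := by
  induction chars generalizing s with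
  | nil => simp
  | cons c rest ih =>
      by_cases hc : c ∈ s
      · have hle := foldl_add_length_le rest s
        rw [List.foldl_cons, PySem.Set.add_of_mem hc]
        constructor
        · intro heq
          exfalso
          simp only [List.length_cons] at heq
          omega
        · rintro ⟨_, hall⟩
          exact absurd hc (hall c (by simp))
      · rw [List.foldl_cons, PySem.Set.add_of_not_mem hc]
        have heq : List.length s + (c :: rest).length = List.length (s ++ [c]) + rest.length := by
          simp only [List.length_cons, List.length_append, List.length_nil]
          omega
        rw [heq, ih (s ++ [c])]
        constructor
        · rintro ⟨hnd, hall⟩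
          have hcr : c ∉ rest := fun hmem => by simpa using (hall c hmem)
          refine ⟨List.nodup_cons.mpr ⟨hcr, hnd⟩, fun x hx => ?_⟩
          rcases List.mem_cons.mp hx with rfl | hx'
          · exact hc
          · have := hall x hx'
            simp only [List.mem_append, List.mem_singleton] at this
            tauto
        · rintro ⟨hnd, hall⟩
          rw [List.nodup_cons] at hnd
          refine ⟨hnd.2, fun x hx => ?_⟩
          simp only [List.mem_append, List.mem_singleton]
          rintro (hxs | rfl)
          · exact hall x (List.mem_cons_of_mem _ hx) hxs
          · exact hnd.1 hx

lemma ofList_length_eq_iff_nodup (chars : List Char) :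
    (PySem.Set.ofList chars).length = chars.length ↔ chars.Nodup := by
  rw [PySem.Set.ofList_eq_foldl]
  simpa using foldl_add_length_eq_iff chars []

-- ===== VERDICT (by name: the statement is the Claim_ definition above) =====
theorem check_repeat_spec : Claim_equal_check_repeat := by
  intro s start end_ _hdom hpre
  unfold Spec_check_repeat
  have hall : ∀ i ∈ PySem.List.pyRange start end_ 1, (PySem.List.pyGet? s.toList i).isSome := by
    intro i hi
    rw [PySem.List.mem_pyRange_one] at hi
    have hb := hpre (lt_of_le_of_lt hi.1 hi.2)
    rw [Option.isSome_iff_ne_none]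
    intro hnone
    rw [PySem.List.pyGet?_eq_none_iff] at hnone
    exact hnone (by unfold PySem.Raise.InRange; omega)
  obtain ⟨chars, hmap, hloop⟩ :=
    check_repeat_loop_char s.toList (PySem.List.pyRange start end_ 1) hall
  unfold check_repeat check_repeat_alt
  rw [hmap]
  have hA := hloop PySem.Dict.empty
  simp only [PySem.Dict.contains_empty] at hA
  have hA' : check_repeat_loop s.toList (PySem.List.pyRange start end_ 1) PySem.Dict.empty = true ↔
      ¬ chars.Nodup := by rw [hA]; simp
  have hB : (decide ((PySem.Set.ofList chars).length ≠ chars.length) = true) ↔ ¬ chars.Nodup := by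
    simp [ofList_length_eq_iff_nodup]
  rw [Bool.eq_iff_iff, hA', hB]
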